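-- pv_equiv track=rewrite | github.com/gourav-sharma1857/cipher-spry-backend | patterns.py | vowel_position_swap
-- ===== SOURCE A (Python) =====
-- VOWELS = "AEIOU" # String of uppercase vowels
--
-- def is_vowel(char: str) -> bool: # Function to check if a character is a vowel
--     return char.upper() in VOWELS # Convert char to uppercase and check if it's in the VOWELS string
--
-- def vowel_position_swap(word: str) -> str: # Pattern: swaps the first and last vowels in the word
--     transformed = list(word) # Convert to list for mutability
--     vowel_indices = [i for i, char in enumerate(word) if is_vowel(char)] # Find all indices of vowels
--
--
--     if len(vowel_indices) >= 2: # If there are at least two vowels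
--         first_vowel_idx = vowel_indices[0] # Get the index of the first vowel
--         last_vowel_idx = vowel_indices[-1] # Get the index of the last vowel
--         # Swap the characters at these two indices
--         transformed[first_vowel_idx], transformed[last_vowel_idx] = \
--             transformed[last_vowel_idx], transformed[first_vowel_idx]
--     return "".join(transformed) # Join the list of characters
-- ===== SOURCE B (Python) =====
-- VOWELS = "AEIOU"
--
-- def is_vowel(char: str) -> bool:
--     return char.upper() in VOWELS
--
-- def vowel_position_swap(word: str) -> str:
--     # Two-pointer scan from both ends; rebuilds the result from slices.
--     n = len(word)
--     i = 0
--     while i < n and not is_vowel(word[i]):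
--         i += 1
--     j = n - 1
--     while i < j and not is_vowel(word[j]):
--         j -= 1
--     if i < j:
--         return word[:i] + word[j] + word[i+1:j] + word[i] + word[j+1:]
--     return word
-- ===== Notes on version B (the rewrite author's own statement) =====
-- stated objective: alternative
-- what changed: A builds the full list of vowel indices with an enumerate comprehension and then swaps at its first and last entry; B never materialises that list: it runs a two-pointer scan inward from both ends to find the first and last vowel and rebuilds the string from slices.
import Mathlib
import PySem

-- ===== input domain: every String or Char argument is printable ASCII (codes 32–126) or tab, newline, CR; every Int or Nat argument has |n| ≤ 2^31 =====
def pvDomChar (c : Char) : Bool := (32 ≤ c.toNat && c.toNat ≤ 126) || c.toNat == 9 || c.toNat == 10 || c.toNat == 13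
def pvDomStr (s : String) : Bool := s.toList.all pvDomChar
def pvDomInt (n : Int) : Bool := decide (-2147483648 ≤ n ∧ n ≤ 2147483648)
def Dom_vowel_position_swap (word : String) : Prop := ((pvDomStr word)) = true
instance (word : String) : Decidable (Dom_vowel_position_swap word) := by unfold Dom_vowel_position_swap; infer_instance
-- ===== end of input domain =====

-- B replaces A's collect-all-vowel-indices comprehension by a two-pointer scan from both
-- ends that rebuilds the result from slices (objective: alternative decomposition, same cost).

-- ===== PORT A =====
-- shared module helper is_vowel: char.upper() in "AEIOU" (for a 1-char string, substring test = membership)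
def isVowel (c : Char) : Bool := PySem.Chars.upperChar c ∈ "AEIOU".toList

def vowel_position_swap (word : String) : String :=
  let transformed := word.toList
  let vowel_indices := ((PySem.List.enumerate word.toList 0).filter (fun p => isVowel p.2)).map (·.1)
  if 2 ≤ vowel_indices.length then
    let first_vowel_idx := PySem.List.pyGetD vowel_indices 0 0        -- in range: guarded by length ≥ 2
    let last_vowel_idx := PySem.List.pyGetD vowel_indices (-1) 0
    -- simultaneous swap: read both old values, then assign (indices come from enumerate, in range)
    let a := PySem.List.pyGetD transformed first_vowel_idx ' '
    let b := PySem.List.pyGetD transformed last_vowel_idx ' '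
    String.ofList (PySem.List.pySetD (PySem.List.pySetD transformed first_vowel_idx b) last_vowel_idx a)
  else String.ofList transformed

-- ===== PORT B =====
-- while i < n and not is_vowel(word[i]): i += 1
def bScanF (cs : List Char) (i : Nat) : Nat :=
  if h : i < cs.length ∧ isVowel (cs.getD i ' ') = false then bScanF cs (i + 1) else i
termination_by cs.length - i
decreasing_by omega

-- while i < j and not is_vowel(word[j]): j -= 1   (j is a Python int, may start at -1)
def bScanB (cs : List Char) (i : Nat) (j : Int) : Int :=
  if h : (i : Int) < j ∧ isVowel (PySem.List.pyGetD cs j ' ') = false then bScanB cs i (j - 1) else j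
termination_by j.toNat
decreasing_by omega

def vowel_position_swap_alt (word : String) : String :=
  let cs := word.toList
  let n := cs.length
  let i := bScanF cs 0
  let j := bScanB cs i ((n : Int) - 1)
  if (i : Int) < j then
    -- word[:i] + word[j] + word[i+1:j] + word[i] + word[j+1:]  (indices in range in this branch)
    String.ofList (PySem.List.slice cs none (some (i : Int)) ++ [PySem.List.pyGetD cs j ' ']
      ++ PySem.List.slice cs (some ((i : Int) + 1)) (some j) ++ [PySem.List.pyGetD cs (i : Int) ' ']
      ++ PySem.List.slice cs (some (j + 1)) none)
  else word

-- ===== PRECONDITION & SPEC =====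
def Spec_vowel_position_swap (word : String) (out : String) : Prop := out = vowel_position_swap_alt word
instance (word : String) (out : String) : Decidable (Spec_vowel_position_swap word out) := by unfold Spec_vowel_position_swap; infer_instance

-- ===== CLAIM (what is proved, stated in full; the proofs are below) =====
def Claim_equal_vowel_position_swap : Prop := ∀ (word : String), Dom_vowel_position_swap word → Spec_vowel_position_swap word (vowel_position_swap word)

-- ===== LEMMAS AND PROOFS =====

-- proof-side shorthand for the scanned predicate
def notVowel (c : Char) : Bool := !isVowel c

lemma takeWhile_all (P : List Char) (hP : ∀ c ∈ P, isVowel c = false) :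
    P.takeWhile notVowel = P := by
  induction P with
  | nil => rfl
  | cons c t ih =>
    have h1 : notVowel c = true := by simp [notVowel, hP c (by simp)]
    rw [List.takeWhile_cons, if_pos h1, ih (fun c hc => hP c (by simp [hc]))]

lemma takeWhile_append_vowel (P R : List Char) (v : Char)
    (hP : ∀ c ∈ P, isVowel c = false) (hv : isVowel v = true) :
    (P ++ v :: R).takeWhile notVowel = P := by
  rw [List.takeWhile_append, takeWhile_all P hP]
  simp [notVowel, hv]

lemma getD_append_length (P R : List Char) (v : Char) (d : Char) :
    (P ++ v :: R).getD P.length d = v := by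
  induction P with
  | nil => rfl
  | cons c t ih => simpa using ih

lemma set_append_length (P R : List Char) (v w : Char) :
    (P ++ v :: R).set P.length w = P ++ w :: R := by
  induction P with
  | nil => rfl
  | cons c t ih => simpa using ih

lemma filtmap_nil (l : List Char) (s : Int) (h : ∀ c ∈ l, isVowel c = false) :
    ((PySem.List.enumerate l s).filter (fun p => isVowel p.2)).map (·.1) = [] := by
  rw [List.filter_eq_nil_iff.mpr, List.map_nil]
  intro p hp
  rw [PySem.List.mem_enumerate_iff] at hp
  obtain ⟨k, hk, rfl⟩ := hp
  simp [h _ (List.getElem_mem hk)]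

lemma scanF_eq (cs : List Char) (i : Nat) :
    bScanF cs i = i + ((cs.drop i).takeWhile notVowel).length := by
  fun_induction bScanF cs i with
  | case1 i h ih =>
    rw [ih, List.drop_eq_getElem_cons h.1, List.takeWhile_cons]
    rw [List.getD_eq_getElem cs ' ' h.1] at h
    simp [notVowel, h.2]
    omega
  | case2 i h =>
    rcases Nat.lt_or_ge i cs.length with hlt | hge
    · rw [List.drop_eq_getElem_cons hlt, List.takeWhile_cons]
      have : isVowel cs[i] = true := by
        by_contra hc
        exact h ⟨hlt, by rw [List.getD_eq_getElem cs ' ' hlt]; simpa using hc⟩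
      simp [notVowel, this]
    · simp [List.drop_eq_nil_of_le hge]

lemma take_add_one_reverse (cs : List Char) (k : Nat) (hk : k < cs.length) :
    (cs.take (k + 1)).reverse = cs.getD k ' ' :: (cs.take k).reverse := by
  rw [List.take_add_one, List.getElem?_eq_getElem hk]
  simp [List.getD, List.getElem?_eq_getElem hk]

lemma scanB_eq (cs : List Char) (i : Nat) (_hi : i < cs.length)
    (hv : isVowel (cs.getD i ' ') = true) (j : Int) (hij : (i : Int) ≤ j) (hj : j < cs.length) :
    bScanB cs i j = ((j.toNat - ((cs.take (j.toNat + 1)).reverse.takeWhile notVowel).length : Nat) : Int) := by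
  fun_induction bScanB cs i j with
  | case1 j h ih =>
    obtain ⟨hltij, hnvj⟩ := h
    have hj0 : (0:Int) ≤ j := le_trans (by positivity) hij
    have hjn : j.toNat < cs.length := by omega
    have hget : PySem.List.pyGetD cs j ' ' = cs.getD j.toNat ' ' := by
      conv_lhs => rw [show j = ((j.toNat : Nat) : Int) by omega]
      rw [PySem.List.pyGetD_natCast]
    have hnvb : notVowel (cs.getD j.toNat ' ') = true := by
      unfold notVowel; rw [← hget, hnvj]; rfl
    rw [take_add_one_reverse cs j.toNat hjn, List.takeWhile_cons, if_pos hnvb, List.length_cons]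
    rw [ih (by omega) (by omega)]
    rw [show (j - 1).toNat = j.toNat - 1 by omega, Nat.sub_add_cancel (by omega)]
    omega
  | case2 j h =>
    have hj0 : (0:Int) ≤ j := le_trans (by positivity) hij
    have hjn : j.toNat < cs.length := by omega
    have hget : PySem.List.pyGetD cs j ' ' = cs.getD j.toNat ' ' := by
      conv_lhs => rw [show j = ((j.toNat : Nat) : Int) by omega]
      rw [PySem.List.pyGetD_natCast]
    have hvj : isVowel (cs.getD j.toNat ' ') = true := by
      rcases Decidable.em ((i:Int) < j) with hlt | hnlt
      · by_contra hc
        exact h ⟨hlt, by rw [hget]; simpa using hc⟩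
      · rw [show j.toNat = i by omega]; exact hv
    have hnv : notVowel (cs.getD j.toNat ' ') = false := by
      unfold notVowel; rw [hvj]; rfl
    rw [take_add_one_reverse cs j.toNat hjn, List.takeWhile_cons, if_neg (by simp only [hnv]; simp),
      List.length_nil]
    omega

lemma V_split (P R : List Char) (v : Char)
    (hP : ∀ c ∈ P, isVowel c = false) (hv : isVowel v = true) :
    ((PySem.List.enumerate (P ++ v :: R) 0).filter (fun p => isVowel p.2)).map (·.1)
      = ((P.length : Int)) :: ((PySem.List.enumerate R ((P.length : Int) + 1)).filter (fun p => isVowel p.2)).map (·.1) := by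
  rw [PySem.List.enumerate_append, List.filter_append, List.map_append, filtmap_nil P 0 hP,
    List.nil_append, PySem.List.enumerate_cons, List.filter_cons]
  simp [hv]

lemma V_split_last (M S : List Char) (w : Char) (s : Int)
    (hS : ∀ c ∈ S, isVowel c = false) (hw : isVowel w = true) :
    ((PySem.List.enumerate (M ++ w :: S) s).filter (fun p => isVowel p.2)).map (·.1)
      = ((PySem.List.enumerate M s).filter (fun p => isVowel p.2)).map (·.1) ++ [s + M.length] := by
  rw [PySem.List.enumerate_append, List.filter_append, List.map_append, PySem.List.enumerate_cons,
    List.filter_cons]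
  simp [hw, filtmap_nil S _ hS]

lemma pyGetD_zero_cons (y : Int) (ys : List Int) : PySem.List.pyGetD (y :: ys) 0 0 = y := by
  rw [show (0:Int) = ((0:Nat) : Int) from rfl, PySem.List.pyGetD_natCast]
  rfl

lemma pyGetD_neg_one_concat (xs : List Int) (x : Int) :
    PySem.List.pyGetD (xs ++ [x]) (-1) 0 = x := by
  rw [PySem.List.pyGetD_neg_ofNat (xs ++ [x]) 1 0 (by omega) (by simp)]
  exact List.getElem_concat_length (by simp) _

lemma A_none (word : String) (h : ∀ c ∈ word.toList, isVowel c = false) :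
    vowel_position_swap word = word := by
  unfold vowel_position_swap
  rw [filtmap_nil _ 0 h]
  simp

lemma B_none (word : String) (h : ∀ c ∈ word.toList, isVowel c = false) :
    vowel_position_swap_alt word = word := by
  simp only [vowel_position_swap_alt]
  have hi : bScanF word.toList 0 = word.toList.length := by
    rw [scanF_eq]
    simp [takeWhile_all _ h]
  rw [hi, bScanB]
  rw [dif_neg (by omega)]
  rw [if_neg (by omega)]

lemma A_one (word : String) (P R : List Char) (v : Char)
    (hcs : word.toList = P ++ v :: R)
    (hP : ∀ c ∈ P, isVowel c = false) (hv : isVowel v = true)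
    (hR : ∀ c ∈ R, isVowel c = false) :
    vowel_position_swap word = word := by
  have hV : ((PySem.List.enumerate word.toList 0).filter (fun p => isVowel p.2)).map (·.1)
      = [(P.length : Int)] := by
    rw [hcs, V_split P R v hP hv, filtmap_nil R _ hR]
  unfold vowel_position_swap
  rw [hV]
  simp

lemma B_one (word : String) (P R : List Char) (v : Char)
    (hcs : word.toList = P ++ v :: R)
    (hP : ∀ c ∈ P, isVowel c = false) (hv : isVowel v = true)
    (hR : ∀ c ∈ R, isVowel c = false) :
    vowel_position_swap_alt word = word := by
  have hlen : word.toList.length = P.length + 1 + R.length := by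
    rw [hcs]; simp; omega
  have hi : bScanF word.toList 0 = P.length := by
    rw [scanF_eq, List.drop_zero, hcs, takeWhile_append_vowel P R v hP hv]
    omega
  have hv' : isVowel (word.toList.getD P.length ' ') = true := by
    rw [hcs, getD_append_length]; exact hv
  have hj : bScanB word.toList P.length ((word.toList.length : Int) - 1) = (P.length : Int) := by
    rw [scanB_eq word.toList P.length (by omega) hv' _ (by omega) (by omega)]
    rw [show ((word.toList.length : Int) - 1).toNat = word.toList.length - 1 by omega,
      Nat.sub_add_cancel (by omega), List.take_length]
    have hrev : word.toList.reverse = R.reverse ++ v :: P.reverse := by rw [hcs]; simp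
    rw [hrev, takeWhile_append_vowel _ _ v (fun c hc => hR c (by simpa using hc)) hv,
      List.length_reverse]
    omega
  simp only [vowel_position_swap_alt]
  rw [hi, hj, if_neg (by simp)]

lemma A_two (word : String) (P M S : List Char) (v w : Char)
    (hcs : word.toList = P ++ v :: (M ++ w :: S))
    (hP : ∀ c ∈ P, isVowel c = false) (hv : isVowel v = true)
    (hS : ∀ c ∈ S, isVowel c = false) (hw : isVowel w = true) :
    vowel_position_swap word = String.ofList (P ++ w :: (M ++ v :: S)) := by
  have hV : ((PySem.List.enumerate word.toList 0).filter (fun p => isVowel p.2)).map (·.1)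
      = ((P.length : Int))
        :: (((PySem.List.enumerate M ((P.length : Int) + 1)).filter (fun p => isVowel p.2)).map (·.1)
          ++ [(P.length : Int) + 1 + (M.length : Int)]) := by
    rw [hcs, V_split P (M ++ w :: S) v hP hv, V_split_last M S w _ hS hw]
  simp only [vowel_position_swap]
  rw [hV, if_pos (by simp)]
  rw [pyGetD_zero_cons, ← List.cons_append, pyGetD_neg_one_concat]
  have ha : PySem.List.pyGetD word.toList ((P.length : Int)) ' ' = v := by
    rw [PySem.List.pyGetD_natCast, hcs, getD_append_length]
  have hb : PySem.List.pyGetD word.toList ((P.length : Int) + 1 + (M.length : Int)) ' ' = w := by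
    rw [show ((P.length : Int) + 1 + (M.length : Int)) = ((P.length + 1 + M.length : Nat) : Int)
      by push_cast; ring]
    rw [PySem.List.pyGetD_natCast]
    have hcs2 : word.toList = (P ++ v :: M) ++ w :: S := by rw [hcs]; simp
    rw [hcs2, show P.length + 1 + M.length = (P ++ v :: M).length
      by simp only [List.length_append, List.length_cons]; omega, getD_append_length]
  rw [ha, hb]
  have hs1 : PySem.List.pySetD word.toList ((P.length : Int)) w = (P ++ w :: M) ++ w :: S := by
    rw [PySem.List.pySetD_of_nonneg _ _ (by positivity)]
    simp only [Int.toNat_natCast]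
    rw [hcs, set_append_length]
    simp
  rw [hs1]
  have hs2 : PySem.List.pySetD ((P ++ w :: M) ++ w :: S) ((P.length : Int) + 1 + (M.length : Int)) v
      = (P ++ w :: M) ++ v :: S := by
    rw [show ((P.length : Int) + 1 + (M.length : Int)) = ((P.length + 1 + M.length : Nat) : Int)
      by push_cast; ring]
    rw [PySem.List.pySetD_of_nonneg _ _ (by positivity)]
    simp only [Int.toNat_natCast]
    rw [show P.length + 1 + M.length = (P ++ w :: M).length
      by simp only [List.length_append, List.length_cons]; omega, set_append_length]
  rw [hs2]
  simp

lemma B_two (word : String) (P M S : List Char) (v w : Char)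
    (hcs : word.toList = P ++ v :: (M ++ w :: S))
    (hP : ∀ c ∈ P, isVowel c = false) (hv : isVowel v = true)
    (hS : ∀ c ∈ S, isVowel c = false) (hw : isVowel w = true) :
    vowel_position_swap_alt word = String.ofList (P ++ w :: (M ++ v :: S)) := by
  have hlen : word.toList.length = P.length + 1 + M.length + 1 + S.length := by
    rw [hcs]; simp only [List.length_append, List.length_cons]; omega
  have hi : bScanF word.toList 0 = P.length := by
    rw [scanF_eq, List.drop_zero, hcs, takeWhile_append_vowel P _ v hP hv]
    omega
  have hv' : isVowel (word.toList.getD P.length ' ') = true := by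
    rw [hcs, getD_append_length]; exact hv
  have hj : bScanB word.toList P.length ((word.toList.length : Int) - 1)
      = ((P.length + 1 + M.length : Nat) : Int) := by
    rw [scanB_eq word.toList P.length (by omega) hv' _ (by omega) (by omega)]
    rw [show ((word.toList.length : Int) - 1).toNat = word.toList.length - 1 by omega,
      Nat.sub_add_cancel (by omega), List.take_length]
    have hrev : word.toList.reverse = S.reverse ++ w :: (M.reverse ++ v :: P.reverse) := by
      rw [hcs]; simp
    rw [hrev, takeWhile_append_vowel _ _ w (fun c hc => hS c (by simpa using hc)) hw,
      List.length_reverse]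
    omega
  simp only [vowel_position_swap_alt]
  rw [hi, hj]
  rw [if_pos (by push_cast; omega)]
  have hsl1 : PySem.List.slice word.toList none (some ((P.length : Int))) = P := by
    rw [PySem.List.slice_to_natCast, hcs]
    exact List.take_left' rfl
  have hb : PySem.List.pyGetD word.toList ((P.length + 1 + M.length : Nat) : Int) ' ' = w := by
    rw [PySem.List.pyGetD_natCast]
    have hcs2 : word.toList = (P ++ v :: M) ++ w :: S := by rw [hcs]; simp
    rw [hcs2, show P.length + 1 + M.length = (P ++ v :: M).length
      by simp only [List.length_append, List.length_cons]; omega, getD_append_length]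
  have ha : PySem.List.pyGetD word.toList ((P.length : Int)) ' ' = v := by
    rw [PySem.List.pyGetD_natCast, hcs, getD_append_length]
  have hsl2 : PySem.List.slice word.toList (some ((P.length : Int) + 1))
      (some ((P.length + 1 + M.length : Nat) : Int)) = M := by
    rw [show ((P.length : Int) + 1) = ((P.length + 1 : Nat) : Int) by push_cast; ring]
    rw [PySem.List.slice_natCast]
    have hcs3 : word.toList = (P ++ [v]) ++ (M ++ w :: S) := by rw [hcs]; simp
    rw [hcs3, List.drop_left' (by simp)]
    rw [show P.length + 1 + M.length - (P.length + 1) = M.length by omega]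
    exact List.take_left' rfl
  have hsl3 : PySem.List.slice word.toList (some (((P.length + 1 + M.length : Nat) : Int) + 1))
      none = S := by
    rw [show (((P.length + 1 + M.length : Nat) : Int) + 1)
      = ((P.length + 1 + M.length + 1 : Nat) : Int) by push_cast; ring]
    rw [PySem.List.slice_from_natCast]
    have hcs4 : word.toList = (P ++ v :: M ++ [w]) ++ S := by rw [hcs]; simp
    have hlen4 : (P ++ v :: M ++ [w]).length = P.length + 1 + M.length + 1 := by
      simp only [List.length_append, List.length_cons, List.length_nil]; omega
    rw [hcs4, List.drop_left' hlen4]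
  rw [hsl1, hb, ha, hsl2, hsl3]
  simp

lemma rev_decomp (R Q T : List Char) (w : Char) (h : R.reverse = Q ++ w :: T) :
    R = T.reverse ++ w :: Q.reverse := by
  have h2 := congrArg List.reverse h
  simpa using h2

lemma split_first (cs : List Char) :
    (∀ c ∈ cs, isVowel c = false) ∨
    ∃ P v R, cs = P ++ v :: R ∧ (∀ c ∈ P, isVowel c = false) ∧ isVowel v = true := by
  have hsplit : cs.takeWhile notVowel ++ cs.dropWhile notVowel = cs :=
    List.takeWhile_append_dropWhile
  have hPfree : ∀ c ∈ cs.takeWhile notVowel, isVowel c = false := by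
    intro c hc
    simpa [notVowel] using List.mem_takeWhile_imp hc
  cases hD : cs.dropWhile notVowel with
  | nil =>
    left
    intro c hc
    rw [← hsplit, hD] at hc
    exact hPfree c (by simpa using hc)
  | cons v R =>
    right
    have hv : isVowel v = true := by
      have := List.head_dropWhile_not notVowel (l := cs) (by simp [hD])
      simp only [hD, List.head_cons, notVowel, Bool.not_eq_false'] at this
      exact this
    exact ⟨cs.takeWhile notVowel, v, R, by rw [← hD]; exact hsplit.symm, hPfree, hv⟩

lemma main_eq (word : String) : vowel_position_swap word = vowel_position_swap_alt word := by
  rcases split_first word.toList with hall | ⟨P, v, R, hcs, hPfree, hv⟩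
  · rw [A_none word hall, B_none word hall]
  rcases split_first R.reverse with hRall | ⟨Q, w, T, hRrev, hQfree, hw⟩
  · have hR : ∀ c ∈ R, isVowel c = false := fun c hc => hRall c (by simpa using hc)
    rw [A_one word P R v hcs hPfree hv hR, B_one word P R v hcs hPfree hv hR]
  · have hR : R = T.reverse ++ w :: Q.reverse := rev_decomp R Q T w hRrev
    have hSfree : ∀ c ∈ Q.reverse, isVowel c = false := fun c hc => hQfree c (by simpa using hc)
    have hcs2 : word.toList = P ++ v :: (T.reverse ++ w :: Q.reverse) := by rw [hcs, hR]
    rw [A_two word P T.reverse Q.reverse v w hcs2 hPfree hv hSfree hw,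
      B_two word P T.reverse Q.reverse v w hcs2 hPfree hv hSfree hw]

-- ===== VERDICT (by name: the statement is the Claim_ definition above) =====
theorem vowel_position_swap_spec : Claim_equal_vowel_position_swap := by
  intro word _
  unfold Spec_vowel_position_swap
  exact main_eq word
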